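-- pv_equiv track=rewrite | github.com/juandarr/ProjectEuler | 120.py | explore_binomials
-- ===== SOURCE A (Python) =====
-- def explore_binomials(limit_n):
--     '''
--     returns the sum of maximum residues of (a+1)^n+(a-1)^n % a^2 for every a from 1 to limit_n
--     '''
--     r_total = 0
--     for a in range(3,limit_n+1):
--         if a%2==0:
--             r_total+=a*(a-2)
--         else:
--             r_total += a*(a-1)
--     return r_total
-- ===== SOURCE B (Python) =====
-- def explore_binomials(limit_n):
--     '''
--     returns the sum of maximum residues of (a+1)^n+(a-1)^n % a^2 for every a from 1 to limit_n
--     '''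
--     n = limit_n
--     if n < 3:
--         return 0
--     h = n // 2
--     k = (n + 1) // 2
--     # sum_{a=3..n} a^2  -  2*(sum of even a in [3..n])  -  (sum of odd a in [3..n])
--     return n * (n + 1) * (2 * n + 1) // 6 - 5 - 2 * (h * (h + 1) - 2) - (k * k - 1)
-- ===== Notes on version B (the rewrite author's own statement) =====
-- stated objective: faster
-- what changed: Replaces the O(n) loop over a=3..n with an O(1) closed form: the summand is a^2 minus 2a (even a) or a (odd a), so the total is the sum-of-squares formula minus arithmetic-series corrections split by parity.
import Mathlib
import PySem

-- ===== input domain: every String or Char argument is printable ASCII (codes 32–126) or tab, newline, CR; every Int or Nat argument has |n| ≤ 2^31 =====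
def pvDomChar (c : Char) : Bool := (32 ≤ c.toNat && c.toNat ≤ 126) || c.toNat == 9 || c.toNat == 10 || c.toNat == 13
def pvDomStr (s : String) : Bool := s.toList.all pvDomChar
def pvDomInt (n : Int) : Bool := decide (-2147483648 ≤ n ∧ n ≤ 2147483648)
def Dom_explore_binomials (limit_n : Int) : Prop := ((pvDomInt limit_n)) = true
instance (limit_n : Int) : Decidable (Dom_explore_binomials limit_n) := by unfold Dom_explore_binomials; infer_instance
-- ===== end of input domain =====

-- B replaces A's O(limit_n) loop by an O(1) closed-form summation (sum of squares minus
-- parity-split arithmetic-series corrections); return values proved equal for all inputs.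

-- ===== PORT A =====
def explore_binomials (limit_n : Int) : Int :=
  (PySem.List.pyRange 3 (limit_n + 1) 1).foldl
    (fun r_total a =>
      if PySem.Int.mod a 2 == 0 then r_total + a * (a - 2) else r_total + a * (a - 1)) 0

-- ===== PORT B =====
def explore_binomials_alt (limit_n : Int) : Int :=
  if limit_n < 3 then 0
  else
    let h := PySem.Int.floordiv limit_n 2
    let k := PySem.Int.floordiv (limit_n + 1) 2
    PySem.Int.floordiv (limit_n * (limit_n + 1) * (2 * limit_n + 1)) 6 - 5
      - 2 * (h * (h + 1) - 2) - (k * k - 1)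

-- ===== PRECONDITION & SPEC =====
def Spec_explore_binomials (limit_n : Int) (out : Int) : Prop := out = explore_binomials_alt limit_n
instance (limit_n : Int) (out : Int) : Decidable (Spec_explore_binomials limit_n out) := by unfold Spec_explore_binomials; infer_instance

-- ===== CLAIM (what is proved, stated in full; the proofs are below) =====
def Claim_equal_explore_binomials : Prop := ∀ (limit_n : Int), Dom_explore_binomials limit_n → Spec_explore_binomials limit_n (explore_binomials limit_n)

-- ===== LEMMAS AND PROOFS =====

-- B satisfies the loop-step recurrence of A.
lemma alt_step (n : Int) (h3 : 3 ≤ n) :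
    explore_binomials_alt n =
      explore_binomials_alt (n - 1) +
        (if PySem.Int.mod n 2 == 0 then n * (n - 2) else n * (n - 1)) := by
  by_cases hn3 : n = 3
  · subst hn3; decide
  have h4 : 4 ≤ n := by omega
  have h2 : ¬ (n < 3) := by omega
  have hlt : ¬ (n - 1 < 3) := by omega
  simp only [explore_binomials_alt,
    PySem.Int.floordiv_eq_ediv_of_pos (b := (2:Int)) (by norm_num : (0:Int) < 2),
    PySem.Int.floordiv_eq_ediv_of_pos (b := (6:Int)) (by norm_num : (0:Int) < 6),
    PySem.Int.mod_eq_emod_of_pos (b := (2:Int)) (by norm_num : (0:Int) < 2)]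
  rw [if_neg h2, if_neg hlt]
  have hdiv : n * (n + 1) * (2 * n + 1) / 6 = (n - 1) * ((n - 1) + 1) * (2 * (n - 1) + 1) / 6 + n * n := by
    rw [show n * (n + 1) * (2 * n + 1) = (n - 1) * ((n - 1) + 1) * (2 * (n - 1) + 1) + (n * n) * 6 from by ring,
      Int.add_mul_ediv_right _ _ (by norm_num : (6:Int) ≠ 0)]
  rcases Int.even_or_odd n with ⟨m, hm⟩ | ⟨m, hm⟩
  · have e1 : n / 2 = m := by omega
    have e2 : (n + 1) / 2 = m := by omega
    have e3 : (n - 1) / 2 = m - 1 := by omega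
    have e4 : (n - 1 + 1) / 2 = m := by omega
    have emod : n % 2 = 0 := by omega
    rw [emod, if_pos (by decide), hdiv, e1, e2, e3, e4]
    subst hm; ring
  · have e1 : n / 2 = m := by omega
    have e2 : (n + 1) / 2 = m + 1 := by omega
    have e3 : (n - 1) / 2 = m := by omega
    have e4 : (n - 1 + 1) / 2 = m := by omega
    have emod : n % 2 = 1 := by omega
    rw [emod, if_neg (by decide), hdiv, e1, e2, e3, e4]
    subst hm; ring

lemma key (t : Nat) : explore_binomials (2 + (t : Int)) = explore_binomials_alt (2 + (t : Int)) := by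
  induction t with
  | zero => decide
  | succ t ih =>
    have hcast : (2 + ((t + 1 : Nat) : Int)) = (2 + (t : Int)) + 1 := by push_cast; ring
    rw [hcast]
    set n : Int := 2 + (t : Int) + 1 with hn
    have h3 : 3 ≤ n := by omega
    have hsplit : PySem.List.pyRange 3 (n + 1) 1 = PySem.List.pyRange 3 n 1 ++ [n] :=
      PySem.List.pyRange_one_succ_right h3
    have hpred : (2 + (t : Int)) = n - 1 := by omega
    rw [hpred] at ih
    unfold explore_binomials
    rw [hsplit, List.foldl_append]
    unfold explore_binomials at ih
    rw [show n - 1 + 1 = n from by ring] at ih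
    rw [ih, alt_step n h3]
    simp only [List.foldl]
    split <;> ring

-- ===== VERDICT (by name: the statement is the Claim_ definition above) =====
theorem explore_binomials_spec : Claim_equal_explore_binomials := by
  intro n _
  unfold Spec_explore_binomials
  by_cases h : n < 3
  · unfold explore_binomials explore_binomials_alt
    rw [PySem.List.pyRange_one_eq_nil (by omega : n + 1 ≤ 3), if_pos h]
    rfl
  · have : n = 2 + ((n - 2).toNat : Int) := by omega
    rw [this]
    exact key (n - 2).toNat
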